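-- pv_equiv track=rewrite | github.com/Nama21yo/NatnaelHackerrank | premium_questions/Two_pointer/faulty_sensor_1826.py | badSensor
-- ===== SOURCE A (Python) =====
-- from typing import List
--
-- def badSensor(sensor1: List[int], sensor2: List[int]) -> int:
--     # Initialize index and get the length of the sensor arrays
--     index, length = 0, len(sensor1)
--
--     # Find the first mismatch in the sensor readings
--     while index < length - 1:
--         if sensor1[index] != sensor2[index]:
--             break
--         index += 1
--
--     # Variables to track whether the mismatch pattern is consistent with one sensor failing
--     mismatch_sensor1, mismatch_sensor2 = False, False
--
--     # Continue checking for mismatches and determine which sensor, if any, is bad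
--     while index < length - 1:
--         # Check if the rest of sensor1 matches with sensor2 shifted once
--         if sensor1[index + 1] != sensor2[index]:
--             mismatch_sensor1 = True
--         # Check if the rest of sensor2 matches with sensor1 shifted once
--         if sensor1[index] != sensor2[index + 1]:
--             mismatch_sensor2 = True
--         # If both sensors have mismatches after shifting, we can't determine the bad one
--         if mismatch_sensor1 and mismatch_sensor2:
--             return -1
--
--         index += 1
--
--     # If only sensor1 had mismatches, sensor2 is bad
--     if mismatch_sensor1:
--         return 2
--     # If only sensor2 had mismatches, sensor1 is bad
--     elif mismatch_sensor2:
--         return 1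
--     # If there were no mismatches, we cannot determine the bad sensor
--     else:
--         return -1
-- ===== SOURCE B (Python) =====
-- from typing import List
--
-- def badSensor(sensor1: List[int], sensor2: List[int]) -> int:
--     n = len(sensor1)
--     # forward scan: first index where the two readings diverge (capped at n-1)
--     p = 0
--     while p < n - 1 and sensor1[p] == sensor2[p]:
--         p += 1
--     # backward scans: minimal boundary from which the one-position-shifted
--     # agreement (sensorX[i+1] == sensorY[i]) extends to the end of the arrays
--     e1 = n - 1
--     while e1 > 0 and sensor1[e1] == sensor2[e1 - 1]:
--         e1 -= 1
--     e2 = n - 1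
--     while e2 > 0 and sensor2[e2] == sensor1[e2 - 1]:
--         e2 -= 1
--     # the "sensorX dropped a reading" hypothesis is consistent exactly when its
--     # shifted agreement already covers everything from the divergence point on
--     cond1 = p >= e1
--     cond2 = p >= e2
--     if cond1 == cond2:
--         return -1
--     return 1 if cond1 else 2
-- ===== Notes on version B (the rewrite author's own statement) =====
-- stated objective: alternative
-- what changed: Replaces A's forward dual-flag scan with mid-loop early return by two backward scans that compute, for each sensor, the minimal boundary index from which the one-position-shifted agreement extends to the end; the verdict is then pure index arithmetic (comparing each boundary with the first-divergence position).
-- outside the precondition, e.g. on badSensor([1, 2], [1]): A returns -1, B raises IndexError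
import Mathlib
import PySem

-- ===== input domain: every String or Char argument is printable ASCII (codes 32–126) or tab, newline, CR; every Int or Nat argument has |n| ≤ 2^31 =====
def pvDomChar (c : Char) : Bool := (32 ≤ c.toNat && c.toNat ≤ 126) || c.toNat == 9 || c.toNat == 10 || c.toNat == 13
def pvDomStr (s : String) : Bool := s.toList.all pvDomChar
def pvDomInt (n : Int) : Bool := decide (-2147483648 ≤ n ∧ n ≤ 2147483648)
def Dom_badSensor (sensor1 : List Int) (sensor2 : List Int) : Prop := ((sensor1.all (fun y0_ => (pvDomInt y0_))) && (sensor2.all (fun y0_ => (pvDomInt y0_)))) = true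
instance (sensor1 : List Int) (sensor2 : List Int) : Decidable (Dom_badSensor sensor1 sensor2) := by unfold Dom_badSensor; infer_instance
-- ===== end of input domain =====

-- B replaces A's forward dual-flag scan (with mid-loop early return) by two backward
-- scans computing shifted-agreement boundary indices, decided by index arithmetic
-- against the first-divergence position (objective: alternative decomposition).

-- ===== PORT A =====
-- first while loop: advance index while the compared prefix agrees (in-range indexing
-- is guaranteed by Pre_badSensor, where Python would raise IndexError; List.getD is exact there)
-- (fuel = length bounds the iteration count; it is never exhausted while index < length - 1)
def pvLoop1 (s1 s2 : List Int) (length : Nat) : Nat → Nat → Nat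
  | index, 0 => index
  | index, fuel + 1 =>
    if index < length - 1 then
      if s1.getD index 0 ≠ s2.getD index 0 then index
      else pvLoop1 s1 s2 length (index + 1) fuel
    else index

-- second while loop: accumulate the two mismatch flags, early return -1 when both set
def pvLoop2 (s1 s2 : List Int) (length : Nat) : Nat → Bool → Bool → Nat → Int
  | _, m1, m2, 0 => if m1 then 2 else if m2 then 1 else -1
  | index, m1, m2, fuel + 1 =>
    if index < length - 1 then
      let m1' := if s1.getD (index + 1) 0 ≠ s2.getD index 0 then true else m1
      let m2' := if s1.getD index 0 ≠ s2.getD (index + 1) 0 then true else m2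
      if m1' && m2' then -1
      else pvLoop2 s1 s2 length (index + 1) m1' m2' fuel
    else if m1 then 2 else if m2 then 1 else -1

def badSensor (sensor1 : List Int) (sensor2 : List Int) : Int :=
  let length := sensor1.length
  let index := pvLoop1 sensor1 sensor2 length 0 length
  pvLoop2 sensor1 sensor2 length index false false length

-- ===== PORT B =====
-- Source B's forward while loop: p := first divergence index (Int, as in Python; p stays ≥ 0,
-- so p.toNat is exact; indices are in range under Pre_badSensor, where Python would raise)
def pvFwdB (s1 s2 : List Int) (n : Int) : Int → Nat → Int
  | p, 0 => p
  | p, fuel + 1 =>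
    if p < n - 1 ∧ s1.getD p.toNat 0 = s2.getD p.toNat 0 then
      pvFwdB s1 s2 n (p + 1) fuel
    else p

-- Source B's backward while loop: decrement e while the shifted pair u[e] == v[e-1] agrees
-- (the 0 < e guard precedes the indexing, so e.toNat and (e-1).toNat are exact there)
def pvBackB (u v : List Int) : Int → Nat → Int
  | e, 0 => e
  | e, fuel + 1 =>
    if 0 < e ∧ u.getD e.toNat 0 = v.getD (e - 1).toNat 0 then
      pvBackB u v (e - 1) fuel
    else e

def badSensor_alt (sensor1 : List Int) (sensor2 : List Int) : Int :=
  let n : Int := sensor1.length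
  let p := pvFwdB sensor1 sensor2 n 0 sensor1.length
  let e1 := pvBackB sensor1 sensor2 (n - 1) sensor1.length
  let e2 := pvBackB sensor2 sensor1 (n - 1) sensor1.length
  let cond1 := decide (e1 ≤ p)
  let cond2 := decide (e2 ≤ p)
  if cond1 == cond2 then -1 else if cond1 then 1 else 2

-- ===== PRECONDITION & SPEC =====
-- Natural domain: sensor2 at least as long as sensor1 (the original problem has equal
-- lengths). With a shorter sensor2, A in general raises IndexError reading sensor2[index]
-- (it still returns -1 on degenerate prefix-agreeing shorter pairs), and B's backward
-- scan itself raises IndexError reading sensor2[e2], so those inputs are excluded.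
def Pre_badSensor (sensor1 : List Int) (sensor2 : List Int) : Prop :=
  sensor1.length ≤ sensor2.length
instance (sensor1 : List Int) (sensor2 : List Int) : Decidable (Pre_badSensor sensor1 sensor2) := by unfold Pre_badSensor; infer_instance

def pvWitness_badSensor : List Int × List Int := ([1, 2, 3], [1, 5, 2])

def Spec_badSensor (sensor1 : List Int) (sensor2 : List Int) (out : Int) : Prop := out = badSensor_alt sensor1 sensor2
instance (sensor1 : List Int) (sensor2 : List Int) (out : Int) : Decidable (Spec_badSensor sensor1 sensor2 out) := by unfold Spec_badSensor; infer_instance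

-- ===== CLAIM (what is proved, stated in full; the proofs are below) =====
def Claim_equal_badSensor : Prop := ∀ (sensor1 : List Int) (sensor2 : List Int), Dom_badSensor sensor1 sensor2 → Pre_badSensor sensor1 sensor2 → Spec_badSensor sensor1 sensor2 (badSensor sensor1 sensor2)

-- ===== LEMMAS AND PROOFS =====

-- the flag A's second loop ever sets while scanning indices [i, n-1)
def pvChk (u v : List Int) (n i : Nat) : Bool :=
  (List.range' i (n - 1 - i)).any (fun k => u.getD (k + 1) 0 != v.getD k 0)

-- A's final verdict as a function of the two flags
def pvJudge (a b : Bool) : Int :=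
  if a && b then -1 else if a then 2 else if b then 1 else -1

lemma chk_nil (u v : List Int) (n i : Nat) (h : ¬ i < n - 1) :
    pvChk u v n i = false := by
  unfold pvChk
  have h0 : n - 1 - i = 0 := by omega
  simp [h0]

lemma ite_ne_or (a b : Int) (m : Bool) : (if a ≠ b then true else m) = ((a != b) || m) := by
  by_cases h : a = b <;> simp [h]

-- A's first loop is 'first mismatch index in [i, n-1), default n-1'
lemma loop1_eq (s1 s2 : List Int) (n : Nat) : ∀ (fuel i : Nat), n - 1 - i ≤ fuel → i ≤ n - 1 →
    pvLoop1 s1 s2 n i fuel =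
      ((List.range' i (n - 1 - i)).find? (fun k => s1.getD k 0 != s2.getD k 0)).getD (n - 1) := by
  intro fuel
  induction fuel with
  | zero =>
    intro i hfu hi
    have h2 : i = n - 1 := by omega
    simp [pvLoop1, h2]
  | succ fuel ih =>
    intro i hfu hi
    by_cases hlt : i < n - 1
    · rw [pvLoop1]
      have hr : List.range' i (n - 1 - i) = i :: List.range' (i + 1) (n - 1 - (i + 1)) := by
        have h3 : n - 1 - i = (n - 1 - (i + 1)) + 1 := by omega
        rw [h3, List.range'_succ]
      rw [hr, List.find?_cons]
      cases hb : (s1.getD i 0 != s2.getD i 0) with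
      | true =>
        have hp : s1.getD i 0 ≠ s2.getD i 0 := by simpa [bne_iff_ne] using hb
        simp only [List.getD] at hb hp ⊢
        simp [hlt, hp]
      | false =>
        have hp : s1.getD i 0 = s2.getD i 0 := by simpa [bne_iff_ne] using hb
        simp only [List.getD] at hb hp ⊢
        simp only [hlt, if_true]
        rw [if_neg (by simp [hp])]
        have := ih (i + 1) (by omega) (by omega)
        simpa [List.getD] using this
    · have h2 : i = n - 1 := by omega
      simp [pvLoop1, h2]

-- A's second loop equals the verdict on the two accumulated flags
lemma loop2_eq (s1 s2 : List Int) (n : Nat) : ∀ (fuel i : Nat) (m1 m2 : Bool), n - 1 - i ≤ fuel →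
    ¬(m1 = true ∧ m2 = true) →
    pvLoop2 s1 s2 n i m1 m2 fuel = pvJudge (m1 || pvChk s1 s2 n i) (m2 || pvChk s2 s1 n i) := by
  intro fuel
  induction fuel with
  | zero =>
    intro i m1 m2 hfu hm
    have h1 : ¬ i < n - 1 := by omega
    rw [pvLoop2, chk_nil _ _ _ _ h1, chk_nil _ _ _ _ h1]
    cases m1 <;> cases m2 <;> simp_all [pvJudge]
  | succ fuel ih =>
    intro i m1 m2 hfu hm
    by_cases hlt : i < n - 1
    · rw [pvLoop2, if_pos hlt]
      simp only [ite_ne_or]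
      have hc1 : pvChk s1 s2 n i = ((s1.getD (i + 1) 0 != s2.getD i 0) || pvChk s1 s2 n (i + 1)) := by
        unfold pvChk
        have h3 : n - 1 - i = (n - 1 - (i + 1)) + 1 := by omega
        rw [h3, List.range'_succ, List.any_cons]
      have hc2 : pvChk s2 s1 n i = ((s2.getD (i + 1) 0 != s1.getD i 0) || pvChk s2 s1 n (i + 1)) := by
        unfold pvChk
        have h3 : n - 1 - i = (n - 1 - (i + 1)) + 1 := by omega
        rw [h3, List.range'_succ, List.any_cons]
      rw [hc1, hc2]
      have hcomm : ∀ (x y : Int), (x != y) = (y != x) := by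
        intro x y
        simp only [bne]
        by_cases h : x = y
        · subst h; rfl
        · rw [beq_eq_false_iff_ne.mpr h, beq_eq_false_iff_ne.mpr (Ne.symm h)]
      rw [hcomm (s2.getD (i + 1) 0) (s1.getD i 0)]
      by_cases hb : (((s1.getD (i + 1) 0 != s2.getD i 0) || m1) &&
          ((s1.getD i 0 != s2.getD (i + 1) 0) || m2)) = true
      · rw [if_pos hb]
        rw [Bool.and_eq_true] at hb
        have keylem : ∀ (p m c : Bool), (p || m) = true → (m || (p || c)) = true := by decide
        rw [keylem _ _ _ hb.1, keylem _ _ _ hb.2]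
        rfl
      · rw [if_neg hb]
        rw [ih (i + 1) _ _ (by omega)
          (fun hc => hb (by rw [hc.1, hc.2]; rfl))]
        have hassoc : ∀ (a b c : Bool), ((a || b) || c) = (b || (a || c)) := by decide
        rw [hassoc, hassoc]
    · rw [pvLoop2, if_neg hlt, chk_nil _ _ _ _ hlt, chk_nil _ _ _ _ hlt]
      cases m1 <;> cases m2 <;> simp_all [pvJudge]

-- B's forward loop equals the same first-divergence index (as an Int)
lemma fwdB_eq (s1 s2 : List Int) : ∀ (fuel i : Nat),
    s1.length - 1 - i ≤ fuel → i ≤ s1.length - 1 →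
    pvFwdB s1 s2 (s1.length : Int) (i : Int) fuel =
      (((((List.range' i (s1.length - 1 - i)).find?
          (fun k => s1.getD k 0 != s2.getD k 0)).getD (s1.length - 1)) : Nat) : Int) := by
  intro fuel
  induction fuel with
  | zero =>
    intro i hfu hi
    have h2 : i = s1.length - 1 := by omega
    simp [pvFwdB, h2]
  | succ fuel ih =>
    intro i hfu hi
    by_cases hlt : i < s1.length - 1
    · rw [pvFwdB]
      have hr : List.range' i (s1.length - 1 - i)
          = i :: List.range' (i + 1) (s1.length - 1 - (i + 1)) := by
        have h3 : s1.length - 1 - i = (s1.length - 1 - (i + 1)) + 1 := by omega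
        rw [h3, List.range'_succ]
      rw [hr, List.find?_cons]
      have hIlt : (i : Int) < (s1.length : Int) - 1 := by omega
      have htn : ((i : Int)).toNat = i := by omega
      by_cases heq : s1.getD i 0 = s2.getD i 0
      · rw [if_pos ⟨hIlt, by rw [htn]; exact heq⟩]
        have hb : (s1.getD i 0 != s2.getD i 0) = false := by simpa using heq
        simp only [hb]
        have hcast : (i : Int) + 1 = ((i + 1 : Nat) : Int) := by omega
        rw [hcast, ih (i + 1) (by omega) (by omega)]
      · rw [if_neg (by intro hc; apply heq; rw [htn] at hc; exact hc.2)]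
        have hb : (s1.getD i 0 != s2.getD i 0) = true := by simpa using heq
        simp only [hb]
        rfl
    · have h2 : i = s1.length - 1 := by omega
      rw [pvFwdB]
      rw [if_neg (fun hc => by omega)]
      simp [h2]

-- B's backward loop: its result e' bounds the region [e', e) of shifted agreement,
-- and either e' = 0 or the pair just below e' disagrees
lemma backB_spec (u v : List Int) : ∀ (fuel e : Nat), e ≤ fuel →
    ∃ e' : Nat, e' ≤ e ∧ pvBackB u v (e : Int) fuel = (e' : Int) ∧
      (∀ i, e' ≤ i → i < e → u.getD (i + 1) 0 = v.getD i 0) ∧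
      (e' = 0 ∨ u.getD e' 0 ≠ v.getD (e' - 1) 0) := by
  intro fuel
  induction fuel with
  | zero =>
    intro e he
    have h0 : e = 0 := by omega
    subst h0
    exact ⟨0, le_refl 0, rfl, fun i h1 h2 => absurd h2 (by omega), Or.inl rfl⟩
  | succ fuel ih =>
    intro e he
    by_cases h0 : e = 0
    · subst h0
      refine ⟨0, le_refl 0, ?_, fun i h1 h2 => absurd h2 (by omega), Or.inl rfl⟩
      rw [pvBackB, if_neg (fun hc => by exact absurd hc.1 (by omega))]
    · have he1 : 1 ≤ e := by omega
      have ht1 : ((e : Int)).toNat = e := by omega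
      have ht2 : ((e : Int) - 1).toNat = e - 1 := by omega
      by_cases heq : u.getD e 0 = v.getD (e - 1) 0
      · rw [pvBackB] at *
        have hcond : 0 < (e : Int) ∧ u.getD ((e : Int)).toNat 0 = v.getD (((e : Int)) - 1).toNat 0 := by
          rw [ht1, ht2]; exact ⟨by omega, heq⟩
        obtain ⟨e', he', heq', hag, hst⟩ := ih (e - 1) (by omega)
        refine ⟨e', by omega, ?_, ?_, hst⟩
        · rw [if_pos hcond]
          have hcast : (e : Int) - 1 = ((e - 1 : Nat) : Int) := by omega
          rw [hcast]; exact heq'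
        · intro i hi1 hi2
          by_cases hie : i < e - 1
          · exact hag i hi1 hie
          · have hie2 : i = e - 1 := by omega
            subst hie2
            rw [show (e - 1) + 1 = e by omega]
            exact heq
      · refine ⟨e, le_refl e, ?_, fun i h1 h2 => absurd h1 (by omega), Or.inr heq⟩
        rw [pvBackB]
        rw [if_neg (by intro hc; apply heq; rw [ht1, ht2] at hc; exact hc.2)]

-- comparing the boundary with the divergence position decides exactly A's flag
lemma decide_le_eq_not_chk (u v : List Int) (n p e' : Nat)
    (hp : p ≤ n - 1) (he : e' ≤ n - 1)
    (hag : ∀ i, e' ≤ i → i < n - 1 → u.getD (i + 1) 0 = v.getD i 0)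
    (hst : e' = 0 ∨ u.getD e' 0 ≠ v.getD (e' - 1) 0) :
    decide ((e' : Int) ≤ (p : Int)) = !pvChk u v n p := by
  by_cases hle : e' ≤ p
  · rw [decide_eq_true (by omega : (e' : Int) ≤ (p : Int))]
    have hchk : pvChk u v n p = false := by
      unfold pvChk
      rw [List.any_eq_false]
      intro k hk
      rw [List.mem_range'_1] at hk
      have h := hag k (by omega) (by omega : k < n - 1)
      simpa using h
    rw [hchk]; rfl
  · rw [decide_eq_false (by omega : ¬ ((e' : Int) ≤ (p : Int)))]
    have he1 : 1 ≤ e' := by omega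
    have hne : u.getD e' 0 ≠ v.getD (e' - 1) 0 := by
      rcases hst with h | h
      · omega
      · exact h
    have hchk : pvChk u v n p = true := by
      unfold pvChk
      rw [List.any_eq_true]
      refine ⟨e' - 1, ?_, ?_⟩
      · rw [List.mem_range'_1]
        constructor
        · omega
        · omega
      · rw [show (e' - 1) + 1 = e' by omega]
        simpa [bne_iff_ne] using hne
    rw [hchk]; rfl

-- A's verdict against B's final branch shape
lemma judge_eq_branch (c1 c2 : Bool) :
    pvJudge c1 c2 = (if (!c1) == (!c2) then (-1 : Int) else if !c1 then 1 else 2) := by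
  cases c1 <;> cases c2 <;> simp [pvJudge]

theorem badSensor_spec : Claim_equal_badSensor := by
  intro s1 s2 _hdom hpre
  unfold Pre_badSensor at hpre
  unfold Spec_badSensor badSensor badSensor_alt
  simp only []
  by_cases hn : s1.length = 0
  · obtain rfl := List.eq_nil_of_length_eq_zero hn
    rfl
  · have hn1 : 1 ≤ s1.length := by omega
    -- the common first-divergence index
    set start : Nat := (((List.range' 0 (s1.length - 1)).find?
        (fun k => s1.getD k 0 != s2.getD k 0)).getD (s1.length - 1)) with hstartdef
    have hstart_le : start ≤ s1.length - 1 := by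
      rw [hstartdef]
      cases hf : (List.range' 0 (s1.length - 1)).find? (fun k => s1.getD k 0 != s2.getD k 0) with
      | none => simp
      | some j =>
        have hm := List.mem_of_find?_eq_some hf
        rw [List.mem_range'_1] at hm
        simp
        omega
    -- A's loops
    have hA1 : pvLoop1 s1 s2 s1.length 0 s1.length = start := by
      have h := loop1_eq s1 s2 s1.length s1.length 0 (by omega) (by omega)
      simpa using h
    rw [hA1, loop2_eq s1 s2 s1.length s1.length start false false (by omega) (by simp)]
    simp only [Bool.false_or]
    -- B's forward loop
    have hB1 : pvFwdB s1 s2 (s1.length : Int) 0 s1.length = (start : Int) := by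
      have h := fwdB_eq s1 s2 s1.length 0 (by omega) (by omega)
      simpa using h
    rw [hB1]
    -- B's backward loops
    have hcast : (s1.length : Int) - 1 = ((s1.length - 1 : Nat) : Int) := by omega
    rw [hcast]
    obtain ⟨e1, he1le, he1eq, hag1, hst1⟩ := backB_spec s1 s2 s1.length (s1.length - 1) (by omega)
    obtain ⟨e2, he2le, he2eq, hag2, hst2⟩ := backB_spec s2 s1 s1.length (s1.length - 1) (by omega)
    rw [he1eq, he2eq]
    rw [decide_le_eq_not_chk s1 s2 s1.length start e1 hstart_le (by omega) hag1 hst1]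
    rw [decide_le_eq_not_chk s2 s1 s1.length start e2 hstart_le (by omega) hag2 hst2]
    exact judge_eq_branch _ _
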